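-- pv_equiv track=rewrite | github.com/pypi-data/pypi-mirror-294 | packages/exponent-run/exponent_run-0.0.36.tar.gz/exponent_run-0.0.36/exponent/core/remote_execution/file_write.py | get_raw_udiff_hunks
-- ===== SOURCE A (Python) =====
-- def get_raw_udiff_hunks(content: str) -> list[list[str]]:
--     lines = content.splitlines(keepends=True)
--     hunks: list[list[str]] = []
--     current_hunk: list[str] = []
--     for line in lines:
--         if line.startswith("@@"):
--             if current_hunk:
--                 hunks.append(current_hunk)
--                 current_hunk = []
--         else:
--             current_hunk.append(line)
--     if current_hunk:
--         hunks.append(current_hunk)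
--     return hunks
-- ===== SOURCE B (Python) =====
-- def get_raw_udiff_hunks(content: str) -> list[list[str]]:
--     # Group the lines into maximal runs of equal "is an @@ line" key
--     # (itertools.groupby-style), then keep only the non-@@ runs.
--     runs: list[tuple[bool, list[str]]] = []
--     for line in content.splitlines(keepends=True):
--         k = line.startswith("@@")
--         if runs and runs[-1][0] == k:
--             runs[-1][1].append(line)
--         else:
--             runs.append((k, [line]))
--     return [g for k, g in runs if not k]
-- ===== Notes on version B (the rewrite author's own statement) =====
-- stated objective: alternative
-- what changed: Replaces A's current-hunk accumulator and flush-at-separator logic by a groupby-style pass that first builds maximal runs of lines with equal hunk-marker key and then keeps only the non-marker runs.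
import Mathlib
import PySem

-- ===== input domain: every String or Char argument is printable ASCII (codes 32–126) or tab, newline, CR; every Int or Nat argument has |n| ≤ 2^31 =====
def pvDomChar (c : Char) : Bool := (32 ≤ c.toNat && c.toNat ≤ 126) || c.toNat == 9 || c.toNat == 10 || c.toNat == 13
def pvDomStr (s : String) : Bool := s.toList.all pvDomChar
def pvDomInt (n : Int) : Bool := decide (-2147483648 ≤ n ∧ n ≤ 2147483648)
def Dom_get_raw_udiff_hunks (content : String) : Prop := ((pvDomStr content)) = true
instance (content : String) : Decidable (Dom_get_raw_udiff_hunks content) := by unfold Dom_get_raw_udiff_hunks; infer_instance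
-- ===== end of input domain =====

-- B replaces A's current-hunk accumulator with a groupby-style pass that builds
-- maximal runs of equal "is an @@ line" key and then filters out the @@ runs
-- (objective: alternative decomposition, same cost).

-- ===== PORT A =====
-- shared helper: content.splitlines(keepends=True), exact on the tab/LF/CR + printable-ASCII domain
def pvSplitKeep : List Char → List Char → List String
  | [], acc => if acc = [] then [] else [String.ofList acc]
  | '\n' :: rest, acc => String.ofList (acc ++ ['\n']) :: pvSplitKeep rest []
  | '\r' :: '\n' :: rest, acc => String.ofList (acc ++ ['\r', '\n']) :: pvSplitKeep rest []
  | '\r' :: rest, acc => String.ofList (acc ++ ['\r']) :: pvSplitKeep rest []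
  | c :: rest, acc => pvSplitKeep rest (acc ++ [c])

def stepA (st : List (List String) × List String) (line : String) :
    List (List String) × List String :=
  if PySem.Str.startswith line "@@" then
    if st.2 = [] then st else (st.1 ++ [st.2], [])
  else (st.1, st.2 ++ [line])

def get_raw_udiff_hunks (content : String) : List (List String) :=
  let lines := pvSplitKeep content.toList []
  let st := lines.foldl stepA ([], [])
  if st.2 = [] then st.1 else st.1 ++ [st.2]

-- ===== PORT B =====
def stepB (runs : List (Bool × List String)) (line : String) : List (Bool × List String) :=
  let k := PySem.Str.startswith line "@@"
  match runs.getLast? with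
  | some (k', g) => if k' == k then runs.dropLast ++ [(k', g ++ [line])] else runs ++ [(k, [line])]
  | none => [(k, [line])]

def get_raw_udiff_hunks_alt (content : String) : List (List String) :=
  let lines := pvSplitKeep content.toList []
  let runs := lines.foldl stepB []
  (runs.filter (fun p => !p.1)).map (fun p => p.2)

-- ===== PRECONDITION & SPEC =====
def Spec_get_raw_udiff_hunks (content : String) (out : List (List String)) : Prop := out = get_raw_udiff_hunks_alt content
instance (content : String) (out : List (List String)) : Decidable (Spec_get_raw_udiff_hunks content out) := by unfold Spec_get_raw_udiff_hunks; infer_instance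

-- ===== CLAIM (what is proved, stated in full; the proofs are below) =====
def Claim_equal_get_raw_udiff_hunks : Prop := ∀ (content : String), Dom_get_raw_udiff_hunks content → Spec_get_raw_udiff_hunks content (get_raw_udiff_hunks content)

-- ===== LEMMAS AND PROOFS =====

def filteredB (runs : List (Bool × List String)) : List (List String) :=
  (runs.filter (fun p => !p.1)).map (fun p => p.2)

def curOf (runs : List (Bool × List String)) : List String :=
  match runs.getLast? with
  | some (false, g) => g
  | _ => []

def Jinv (runs : List (Bool × List String)) (h : List (List String)) (c : List String) : Prop :=
  filteredB runs = h ++ (if c = [] then [] else [c]) ∧ c = curOf runs ∧ ∀ p ∈ runs, p.2 ≠ []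

theorem step_J (runs : List (Bool × List String)) (h : List (List String)) (c : List String)
    (line : String) (hJ : Jinv runs h c) :
    Jinv (stepB runs line) (stepA (h, c) line).1 (stepA (h, c) line).2 := by
  obtain ⟨h1, h2, h3⟩ := hJ
  by_cases hk : PySem.Chars.startswith line.toList ['@', '@'] = true <;>
    rcases List.eq_nil_or_concat runs with hr | ⟨rs, ⟨k', g⟩, hr⟩ <;> subst hr <;>
    [skip; cases k'; skip; cases k'] <;>
    simp [curOf, filteredB] at h1 h2 h3 ⊢ <;>
    simp_all [stepB, stepA, Jinv, filteredB, curOf] <;>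
    rintro b (hb | rfl) <;> simp_all

theorem fold_J (lines : List String) : ∀ (runs : List (Bool × List String))
    (h : List (List String)) (c : List String), Jinv runs h c →
    Jinv (lines.foldl stepB runs) (lines.foldl stepA (h, c)).1 (lines.foldl stepA (h, c)).2 := by
  induction lines with
  | nil => intro runs h c hJ; exact hJ
  | cons l ls ih =>
      intro runs h c hJ
      have := step_J runs h c l hJ
      simpa [List.foldl] using ih _ _ _ this

-- ===== VERDICT (by name: the statement is the Claim_ definition above) =====
theorem get_raw_udiff_hunks_spec : Claim_equal_get_raw_udiff_hunks := by
  intro content _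
  unfold Spec_get_raw_udiff_hunks get_raw_udiff_hunks get_raw_udiff_hunks_alt
  have hJ0 : Jinv [] [] [] := by
    refine ⟨by simp [filteredB], by simp [curOf], by simp⟩
  have := fold_J (pvSplitKeep content.toList []) [] [] [] hJ0
  obtain ⟨h1, _, _⟩ := this
  simp only [filteredB] at h1
  rw [h1]
  split <;> simp_all
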